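-- pv_equiv track=rewrite | github.com/YueChenkkk/SPC-Novel-Speaker-Identification | data/build_jy_dataset.py | convert_mentions_to_signs
-- ===== SOURCE A (Python) =====
-- def convert_mentions_to_signs(raw_sents, alias2id, max_len):
--     '''
--     Converts role names to masked names `C[X]`,
--     returns the sentences after this conversion and the
--     mappings from role IDs to `C[X]`.
--     '''
--     tokens = []
--     roleid2poses = {}
--     roleid2idx = {}
--
--     sorted_alias_id = sorted(alias2id.items(), key=lambda x: -len(x[0]))
--
--     for idx, sent in enumerate(raw_sents):
--         new_token_list = []
--
--         i = 0
--         while i < len(sent):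
--
--             is_name = False
--             for name, roleid in sorted_alias_id:
--                 if sent[i:i + len(name)] == name:
--                     roleid = alias2id[name]
--
--                     if roleid not in roleid2poses:
--                         roleid2idx[roleid] = f'[C{len(roleid2idx)}]'
--                         roleid2poses[roleid] = []
--                     roleid2poses[roleid].append((idx, len(new_token_list)))
--
--                     new_token_list.append(roleid2idx[roleid])
--                     is_name = True
--                     i += len(name)
--                     break
--
--             if not is_name:
--                 new_token_list.append(sent[i])
--                 i += 1
--
--         new_token_list = new_token_list[:max_len]
--         tokens.append(new_token_list)
--
--     return tokens, roleid2poses, roleid2idx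
-- ===== SOURCE B (Python) =====
-- def convert_mentions_to_signs(raw_sents, alias2id, max_len):
--     '''
--     Same result as the original, but instead of comparing every alias at every
--     character, scan the distinct alias lengths (longest first) and probe the
--     alias dict with one hash lookup per length; the sign/position bookkeeping
--     is done in a separate second pass over the tokenized sentences.
--     '''
--     lengths = sorted({len(name) for name in alias2id}, reverse=True)
--
--     # phase 1: turn each sentence into a list of role ids (int) and chars (str)
--     tokenized = []
--     for sent in raw_sents:
--         toks = []
--         i, n = 0, len(sent)
--         while i < n:
--             for L in lengths:
--                 if i + L <= n and sent[i:i + L] in alias2id: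
--                     toks.append(alias2id[sent[i:i + L]])
--                     i += L
--                     break
--             else:
--                 toks.append(sent[i])
--                 i += 1
--         tokenized.append(toks)
--
--     # phase 2: number the roles in first-encounter order and record positions
--     tokens = []
--     roleid2poses = {}
--     roleid2idx = {}
--     for idx, toks in enumerate(tokenized):
--         out = []
--         for t in toks:
--             if isinstance(t, int):
--                 if t not in roleid2poses:
--                     roleid2idx[t] = f'[C{len(roleid2idx)}]'
--                     roleid2poses[t] = []
--                 roleid2poses[t].append((idx, len(out)))
--                 out.append(roleid2idx[t])
--             else:
--                 out.append(t)
--         tokens.append(out[:max_len])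
--     return tokens, roleid2poses, roleid2idx
-- ===== Notes on version B (the rewrite author's own statement) =====
-- stated objective: faster
-- what changed: Per character A scans the whole length-sorted alias list comparing a slice against every alias; B probes the alias dict once per distinct alias length (longest first) and defers the sign-numbering/position bookkeeping to a second pass over the tokenized sentences.
import Mathlib
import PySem

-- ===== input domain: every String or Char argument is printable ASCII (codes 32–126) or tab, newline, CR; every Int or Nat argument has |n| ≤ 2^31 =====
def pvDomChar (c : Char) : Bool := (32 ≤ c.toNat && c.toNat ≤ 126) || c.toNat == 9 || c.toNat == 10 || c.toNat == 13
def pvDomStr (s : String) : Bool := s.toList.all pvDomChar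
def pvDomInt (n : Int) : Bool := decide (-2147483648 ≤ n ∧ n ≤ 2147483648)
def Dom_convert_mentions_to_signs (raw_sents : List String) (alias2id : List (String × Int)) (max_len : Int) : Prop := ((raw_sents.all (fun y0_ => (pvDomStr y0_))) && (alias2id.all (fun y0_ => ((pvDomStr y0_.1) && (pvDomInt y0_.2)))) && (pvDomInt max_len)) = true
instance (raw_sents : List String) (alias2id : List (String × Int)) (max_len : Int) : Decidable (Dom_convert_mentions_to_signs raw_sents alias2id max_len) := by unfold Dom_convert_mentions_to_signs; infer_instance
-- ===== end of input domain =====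

-- B replaces A's per-character scan over all aliases by one dict probe per distinct
-- alias length (longest first) and moves the sign/position bookkeeping to a second
-- pass over the tokenized sentences (objective: faster when there are many aliases).

-- ===== PORT A =====

-- Python sent[i:i+L] for 0 ≤ i, 0 ≤ L (the only way A and B slice): exact there.
def pvSliceN (s : List Char) (i L : Nat) : List Char := (s.drop i).take L

-- A's inner `for name, roleid in sorted_alias_id: if sent[i:i+len(name)] == name: … break`
def pvAStep? (sa : List (String × Int)) (s : List Char) (i : Nat) : Option (String × Int) :=
  sa.find? (fun p => pvSliceN s i p.1.toList.length == p.1.toList)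

-- A's `while i < len(sent)` loop; fuel = len(sent) suffices whenever every matched
-- alias is nonempty (each iteration then advances i by at least 1).
def pvAWhile (sa : List (String × Int)) (d : PySem.Dict String Int) (s : List Char) (idx : Int) :
    Nat → Nat → List String × PySem.Dict Int (List (Int × Int)) × PySem.Dict Int String →
    List String × PySem.Dict Int (List (Int × Int)) × PySem.Dict Int String
  | 0, _, st => st
  | fuel + 1, i, (toks, poses, ridx) =>
    if h : i < s.length then
      match pvAStep? sa s i with
      | some (name, _) =>
        -- roleid = alias2id[name]; name is a key of d, so the KeyError default 0 is never used
        let roleid := d.getD name 0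
        let (poses', ridx') :=
          if poses.contains roleid then (poses, ridx)
          else (poses.insert roleid [], ridx.insert roleid ("[C" ++ PySem.Int.toStr (ridx.size : Int) ++ "]"))
        let poses'' := poses'.modify roleid [] (fun l => l ++ [(idx, (toks.length : Int))])
        pvAWhile sa d s idx fuel (i + name.toList.length) (toks ++ [ridx'.getD roleid ""], poses'', ridx')
      | none =>
        pvAWhile sa d s idx fuel (i + 1) (toks ++ [String.ofList [s[i]]], poses, ridx)
    else (toks, poses, ridx)

-- A's `for idx, sent in enumerate(raw_sents)` loop
def pvAOuter (sa : List (String × Int)) (d : PySem.Dict String Int) (max_len : Int) :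
    List String → Int → List (List String) × PySem.Dict Int (List (Int × Int)) × PySem.Dict Int String →
    List (List String) × PySem.Dict Int (List (Int × Int)) × PySem.Dict Int String
  | [], _, st => st
  | sent :: rest, idx, (tokens, poses, ridx) =>
    let s := sent.toList
    let r := pvAWhile sa d s idx s.length 0 ([], poses, ridx)
    pvAOuter sa d max_len rest (idx + 1) (tokens ++ [PySem.List.slice r.1 none (some max_len)], r.2.1, r.2.2)

def convert_mentions_to_signs (raw_sents : List String) (alias2id : List (String × Int)) (max_len : Int) : List (List String) × (List (Int × List (Int × Int))) × (List (Int × String)) :=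
  let d := PySem.Dict.ofList alias2id
  let sa := PySem.List.sorted d.items (fun p => -(p.1.toList.length : Int))
  let r := pvAOuter sa d max_len raw_sents 0 ([], .empty, .empty)
  (r.1, r.2.1.items, r.2.2.items)

-- ===== PORT B =====

-- B's inner `for L in lengths: if i + L <= n and sent[i:i+L] in alias2id: … break`
def pvBFind? (d : PySem.Dict String Int) (lengths : List Nat) (s : List Char) (i : Nat) : Option Nat :=
  lengths.find? (fun L => decide (i + L ≤ s.length) && d.contains (String.ofList (pvSliceN s i L)))

-- B phase 1: tokenize one sentence into role ids (inl) and single chars (inr)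
def pvBTok (d : PySem.Dict String Int) (lengths : List Nat) (s : List Char) :
    Nat → Nat → List (Int ⊕ String) → List (Int ⊕ String)
  | 0, _, acc => acc
  | fuel + 1, i, acc =>
    if h : i < s.length then
      match pvBFind? d lengths s i with
      | some L => pvBTok d lengths s fuel (i + L) (acc ++ [Sum.inl (d.getD (String.ofList (pvSliceN s i L)) 0)])
      | none => pvBTok d lengths s fuel (i + 1) (acc ++ [Sum.inr (String.ofList [s[i]])])
    else acc

-- B phase 2, body of `for t in toks`
def pvBEmit (idx : Int)
    (st : List String × PySem.Dict Int (List (Int × Int)) × PySem.Dict Int String) (t : Int ⊕ String) :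
    List String × PySem.Dict Int (List (Int × Int)) × PySem.Dict Int String :=
  match t, st with
  | Sum.inr c, (out, poses, ridx) => (out ++ [c], poses, ridx)
  | Sum.inl rid, (out, poses, ridx) =>
    let (poses', ridx') :=
      if poses.contains rid then (poses, ridx)
      else (poses.insert rid [], ridx.insert rid ("[C" ++ PySem.Int.toStr (ridx.size : Int) ++ "]"))
    let poses'' := poses'.modify rid [] (fun l => l ++ [(idx, (out.length : Int))])
    (out ++ [ridx'.getD rid ""], poses'', ridx')

-- B phase 2, `for idx, toks in enumerate(tokenized)`
def pvBOuter (max_len : Int) :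
    List (List (Int ⊕ String)) → Int → List (List String) × PySem.Dict Int (List (Int × Int)) × PySem.Dict Int String →
    List (List String) × PySem.Dict Int (List (Int × Int)) × PySem.Dict Int String
  | [], _, st => st
  | toks :: rest, idx, (tokens, poses, ridx) =>
    let r := toks.foldl (pvBEmit idx) ([], poses, ridx)
    pvBOuter max_len rest (idx + 1) (tokens ++ [PySem.List.slice r.1 none (some max_len)], r.2.1, r.2.2)

def convert_mentions_to_signs_alt (raw_sents : List String) (alias2id : List (String × Int)) (max_len : Int) : List (List String) × (List (Int × List (Int × Int))) × (List (Int × String)) :=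
  let d := PySem.Dict.ofList alias2id
  let lengths := PySem.List.sorted (PySem.Set.ofList (d.keys.map (fun k => k.toList.length))) (fun x => x) true
  let tokenized := raw_sents.map (fun sent => pvBTok d lengths sent.toList sent.toList.length 0 [])
  let r := pvBOuter max_len tokenized 0 ([], .empty, .empty)
  (r.1, r.2.1.items, r.2.2.items)

-- ===== PRECONDITION & SPEC =====
def Spec_convert_mentions_to_signs (raw_sents : List String) (alias2id : List (String × Int)) (max_len : Int) (out : List (List String) × (List (Int × List (Int × Int))) × (List (Int × String))) : Prop := out = convert_mentions_to_signs_alt raw_sents alias2id max_len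
instance (raw_sents : List String) (alias2id : List (String × Int)) (max_len : Int) (out : List (List String) × (List (Int × List (Int × Int))) × (List (Int × String))) : Decidable (Spec_convert_mentions_to_signs raw_sents alias2id max_len out) := by unfold Spec_convert_mentions_to_signs; infer_instance

-- ===== CLAIM (what is proved, stated in full; the proofs are below) =====
def Claim_equal_convert_mentions_to_signs : Prop := ∀ (raw_sents : List String) (alias2id : List (String × Int)) (max_len : Int), Dom_convert_mentions_to_signs raw_sents alias2id max_len → Spec_convert_mentions_to_signs raw_sents alias2id max_len (convert_mentions_to_signs raw_sents alias2id max_len)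

-- ===== LEMMAS AND PROOFS =====

-- the length of a Python slice s[i:i+L]
theorem pvSliceN_length (s : List Char) (i L : Nat) : (pvSliceN s i L).length = min L (s.length - i) := by
  simp [pvSliceN]

-- a key equal to the slice s[i:i+L] with i+L ≤ len s has length L and matches A's test
theorem pv_key_matches (s : List Char) (i L : Nat) (hL : i + L ≤ s.length)
    (k : String) (hkey : k = String.ofList (pvSliceN s i L)) :
    k.toList.length = L ∧ (pvSliceN s i k.toList.length == k.toList) = true := by
  have htl : k.toList = pvSliceN s i L := by rw [hkey, String.toList_ofList]
  have hlen : k.toList.length = L := by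
    rw [htl, pvSliceN_length]; omega
  refine ⟨hlen, ?_⟩
  rw [beq_iff_eq, hlen, htl]

-- A's first match in the length-sorted alias list is exactly B's first hit length:
-- both are the longest alias matching at position i (unique, since dict keys are distinct)
theorem pv_step_some (d : PySem.Dict String Int) (s : List Char) (i : Nat) (hi : i < s.length) (name : String) (v : Int)
    (hA : pvAStep? (PySem.List.sorted d.items (fun p => -(p.1.toList.length : Int))) s i = some (name, v)) :
    pvBFind? d (PySem.List.sorted (PySem.Set.ofList (d.keys.map (fun k => k.toList.length))) (fun x => x) true) s i
      = some name.toList.length ∧ String.ofList (pvSliceN s i name.toList.length) = name := by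
  unfold pvAStep? at hA
  rw [List.find?_eq_some_iff_append] at hA
  obtain ⟨hp, as, bs, hsa, hfail⟩ := hA
  rw [beq_iff_eq] at hp
  have hp' : pvSliceN s i name.toList.length = name.toList := hp
  -- the matched alias fits inside the sentence
  have hfit : i + name.toList.length ≤ s.length := by
    have := congrArg List.length hp'
    rw [pvSliceN_length] at this
    omega
  have hk : String.ofList (pvSliceN s i name.toList.length) = name := by
    rw [hp', String.ofList_toList]
  refine ⟨?_, hk⟩
  have hmem_sa : (name, v) ∈ PySem.List.sorted d.items (fun p => -(p.1.toList.length : Int)) := by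
    rw [hsa]; exact List.mem_append_right _ (List.mem_cons_self)
  have hmem_items : (name, v) ∈ d.items := (PySem.List.mem_sorted _ _ _ _).1 hmem_sa
  have hmem_keys : name ∈ d.keys := List.mem_map_of_mem hmem_items
  have hLmem : name.toList.length ∈ PySem.List.sorted (PySem.Set.ofList (d.keys.map (fun k => k.toList.length))) (fun x => x) true := by
    rw [PySem.List.mem_sorted, PySem.Set.mem_ofList]
    exact List.mem_map_of_mem hmem_keys
  have hcond : (decide (i + name.toList.length ≤ s.length) && d.contains (String.ofList (pvSliceN s i name.toList.length))) = true := by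
    rw [hk]
    simp only [Bool.and_eq_true, decide_eq_true_eq]
    exact ⟨hfit, (PySem.Dict.contains_iff_mem_keys d name).2 hmem_keys⟩
  unfold pvBFind?
  -- B's scan cannot come back empty, so it stops at some length L'
  cases hB : (PySem.List.sorted (PySem.Set.ofList (d.keys.map (fun k => k.toList.length))) (fun x => x) true).find?
      (fun L => decide (i + L ≤ s.length) && d.contains (String.ofList (pvSliceN s i L))) with
  | none =>
    exfalso
    exact absurd hcond (by simpa using List.find?_eq_none.1 hB _ hLmem)
  | some L' =>
    rw [List.find?_eq_some_iff_append] at hB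
    obtain ⟨hc, cs, ds, hlens, hfail'⟩ := hB
    simp only [Bool.and_eq_true, decide_eq_true_eq] at hc
    obtain ⟨hL'fit, hL'cont⟩ := hc
    -- the key hit at length L' is an alias that A's scan also sees
    obtain ⟨q, hq_items, hq_fst⟩ := List.mem_map.1 ((PySem.Dict.contains_iff_mem_keys d _).1 hL'cont)
    obtain ⟨hqlen, hqpred⟩ := pv_key_matches s i L' hL'fit q.1 hq_fst
    have hq_sa : q ∈ PySem.List.sorted d.items (fun p => -(p.1.toList.length : Int)) :=
      (PySem.List.mem_sorted _ _ _ _).2 hq_items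
    -- L' ≤ len name : the alias hit by B is not before (name, v) in A's sorted list
    have h1 : L' ≤ name.toList.length := by
      rw [hsa] at hq_sa
      rcases List.mem_append.1 hq_sa with hin | hin
      · exact absurd hqpred (by simpa using hfail q hin)
      · rcases List.mem_cons.1 hin with heq | hin
        · subst heq
          have hqlen' : name.toList.length = L' := hqlen
          omega
        · have hpw := PySem.List.sorted_pairwise d.items (fun p => -(p.1.toList.length : Int))
          rw [hsa, List.pairwise_append] at hpw
          have h3 : -(name.toList.length : Int) ≤ -(q.1.toList.length : Int) := (List.pairwise_cons.1 hpw.2.1).1 q hin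
          omega
    -- len name ≤ L' : len name is not before L' in B's descending length list
    have h2 : name.toList.length ≤ L' := by
      rw [hlens] at hLmem
      rcases List.mem_append.1 hLmem with hin | hin
      · have := hfail' _ hin
        rw [hcond] at this
        simp at this
      · rcases List.mem_cons.1 hin with heq | hin
        · omega
        · have hpw := PySem.List.sorted_pairwise_rev (PySem.Set.ofList (d.keys.map (fun k => k.toList.length))) (fun x => x)
          rw [hlens, List.pairwise_append] at hpw
          exact (List.pairwise_cons.1 hpw.2.1).1 _ hin
    have : L' = name.toList.length := by omega
    rw [this]

-- if A matches no alias at position i, neither does B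
theorem pv_step_none (d : PySem.Dict String Int) (s : List Char) (i : Nat)
    (hA : pvAStep? (PySem.List.sorted d.items (fun p => -(p.1.toList.length : Int))) s i = none) :
    pvBFind? d (PySem.List.sorted (PySem.Set.ofList (d.keys.map (fun k => k.toList.length))) (fun x => x) true) s i = none := by
  unfold pvAStep? at hA
  unfold pvBFind?
  rw [List.find?_eq_none]
  intro L _ hcond
  simp only [Bool.and_eq_true, decide_eq_true_eq] at hcond
  obtain ⟨hLfit, hLcont⟩ := hcond
  obtain ⟨q, hq_items, hq_fst⟩ := List.mem_map.1 ((PySem.Dict.contains_iff_mem_keys d _).1 hLcont)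
  obtain ⟨-, hqpred⟩ := pv_key_matches s i L hLfit q.1 hq_fst
  exact absurd hqpred (by simpa using List.find?_eq_none.1 hA q ((PySem.List.mem_sorted _ _ _ _).2 hq_items))

-- pvBTok's accumulator only collects
theorem pvBTok_acc (d : PySem.Dict String Int) (lengths : List Nat) (s : List Char) :
    ∀ (fuel i : Nat) (acc : List (Int ⊕ String)),
      pvBTok d lengths s fuel i acc = acc ++ pvBTok d lengths s fuel i [] := by
  intro fuel
  induction fuel with
  | zero => intro i acc; simp [pvBTok]
  | succ n ih =>
    intro i acc
    by_cases h : i < s.length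
    · cases hB : pvBFind? d lengths s i with
      | some L =>
        simp only [pvBTok, dif_pos h, hB]
        rw [ih _ (acc ++ _), ih _ ([] ++ _)]
        simp
      | none =>
        simp only [pvBTok, dif_pos h, hB]
        rw [ih _ (acc ++ _), ih _ ([] ++ _)]
        simp
    · simp [pvBTok, h]

-- A's while loop is B's tokenization followed by B's bookkeeping fold
theorem pv_while_eq (d : PySem.Dict String Int) (s : List Char) (idx : Int) :
    ∀ (fuel i : Nat) (st : List String × PySem.Dict Int (List (Int × Int)) × PySem.Dict Int String),
      pvAWhile (PySem.List.sorted d.items (fun p => -(p.1.toList.length : Int))) d s idx fuel i st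
        = (pvBTok d (PySem.List.sorted (PySem.Set.ofList (d.keys.map (fun k => k.toList.length))) (fun x => x) true) s fuel i []).foldl (pvBEmit idx) st := by
  intro fuel
  induction fuel with
  | zero => intro i st; obtain ⟨toks, poses, ridx⟩ := st; simp [pvAWhile, pvBTok]
  | succ n ih =>
    intro i st
    obtain ⟨toks, poses, ridx⟩ := st
    by_cases h : i < s.length
    · cases hA : pvAStep? (PySem.List.sorted d.items (fun p => -(p.1.toList.length : Int))) s i with
      | some p =>
        obtain ⟨name, v⟩ := p
        obtain ⟨hB, hk⟩ := pv_step_some d s i h name v hA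
        simp only [pvAWhile, pvBTok, dif_pos h, hA, hB]
        rw [pvBTok_acc d _ s n _ ([] ++ _), hk]
        simp only [List.nil_append, List.foldl_cons, List.foldl_append]
        rw [ih]
        congr 1
      | none =>
        have hB := pv_step_none d s i hA
        simp only [pvAWhile, pvBTok, dif_pos h, hA, hB]
        rw [pvBTok_acc d _ s n _ ([] ++ _)]
        simp only [List.nil_append]
        rw [ih]
        rfl
    · simp [pvAWhile, pvBTok, h]

-- A's sentence loop is B's map-then-fold over the tokenized sentences
theorem pv_outer_eq (d : PySem.Dict String Int) (max_len : Int) :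
    ∀ (raw : List String) (idx : Int) (st : List (List String) × PySem.Dict Int (List (Int × Int)) × PySem.Dict Int String),
      pvAOuter (PySem.List.sorted d.items (fun p => -(p.1.toList.length : Int))) d max_len raw idx st
        = pvBOuter max_len (raw.map (fun sent => pvBTok d (PySem.List.sorted (PySem.Set.ofList (d.keys.map (fun k => k.toList.length))) (fun x => x) true) sent.toList sent.toList.length 0 [])) idx st := by
  intro raw
  induction raw with
  | nil => intro idx st; rfl
  | cons sent rest ih =>
    intro idx st
    obtain ⟨tokens, poses, ridx⟩ := st
    simp only [pvAOuter, pvBOuter, List.map_cons]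
    rw [pv_while_eq]
    exact ih _ _

-- ===== VERDICT (by name: the statement is the Claim_ definition above) =====
theorem convert_mentions_to_signs_spec : Claim_equal_convert_mentions_to_signs := by
  intro raw_sents alias2id max_len _
  unfold Spec_convert_mentions_to_signs convert_mentions_to_signs convert_mentions_to_signs_alt
  exact congrArg (fun r : List (List String) × PySem.Dict Int (List (Int × Int)) × PySem.Dict Int String => (r.1, r.2.1.items, r.2.2.items))
    (pv_outer_eq (PySem.Dict.ofList alias2id) max_len raw_sents 0 ([], .empty, .empty))
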